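-- pv_equiv track=rewrite | github.com/IgnisUmbrae/TJE-Archipelago | util.py | simplify_queue
-- ===== SOURCE A (Python) =====
-- from itertools import accumulate, chain
-- from functools import partial
-- from math import floor
--
-- FOOD_BASIS = [12, 8, 4]
--
-- def sign(num: int) -> int:
--     return (num > 0) - (num < 0)
--
-- def clamped_add_and_revive(x, y, max_hp):
--     if x == 0:
--         x = max_hp
--     return max(min(x+y, max_hp), 0)
--
-- def split_at_zero(queue: list[int]):
--     if 0 in queue:
--         index = queue.index(0)
--         yield from chain(split_at_zero(queue[:index]), split_at_zero(queue[index+1:]))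
--     else:
--         yield queue
--
-- def greedy_partition(num: int, last: int = 0):
--     if last < len(FOOD_BASIS):
--         divisor = FOOD_BASIS[last]
--         k = floor(num/divisor)
--         yield from chain([k], greedy_partition(num - k*divisor, last+1))
--
-- def express_in_basis(num: int) -> list[int]:
--     return [i*FOOD_BASIS[n]*sign(num) for n, i in enumerate(greedy_partition(abs(num))) if i > 0]
--
-- def simplify_queue(queue: list[int], current_hp: int, max_hp: int) -> tuple[int, list[int]]:
--     accumed_list = list(accumulate(queue, func=partial(clamped_add_and_revive, max_hp=max_hp), initial=current_hp))
--     split_list = list(split_at_zero(accumed_list))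
--     total_subchains = len(split_list)
--
--     death_count = 0
--     leftover_queue = []
--     for n, x in enumerate(split_list):
--         if n < total_subchains - 1:
--             death_count += 1
--         else:
--             if (x and x[-1] == max_hp) or not x:
--                 leftover_queue = []
--             else:
--                 base = max_hp if death_count > 0 else current_hp
--                 leftover_queue = express_in_basis(x[-1] - base)
--
--     return death_count, leftover_queue
-- ===== SOURCE B (Python) =====
-- FOOD_BASIS = [12, 8, 4]
--
-- def simplify_queue(queue: list[int], current_hp: int, max_hp: int) -> tuple[int, list[int]]:
--     # One pass: track running hp and count the deaths (hp hitting 0) directly.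
--     hp = current_hp
--     deaths = 1 if hp == 0 else 0
--     for y in queue:
--         if hp == 0:
--             hp = max_hp
--         hp = max(min(hp + y, max_hp), 0)
--         if hp == 0:
--             deaths += 1
--     if hp == 0 or hp == max_hp:
--         return deaths, []
--     base = max_hp if deaths > 0 else current_hp
--     num = hp - base
--     s = 1 if num > 0 else (-1 if num < 0 else 0)
--     m = abs(num)
--     leftover = []
--     for d in FOOD_BASIS:
--         k = m // d
--         m -= k * d
--         if k > 0:
--             leftover.append(k * d * s)
--     return deaths, leftover
-- ===== Notes on version B (the rewrite author's own statement) =====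
-- stated objective: alternative
-- what changed: Replaces the accumulate-list + recursive slice-splitting generator + enumerate pass with a single loop that tracks the running hp and counts zero-hits directly, plus one direct loop over the basis for the leftover; intended as faster (A is quadratic worst case), measured 3.16x at the largest size but not consistently enough to confirm.
import Mathlib
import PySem

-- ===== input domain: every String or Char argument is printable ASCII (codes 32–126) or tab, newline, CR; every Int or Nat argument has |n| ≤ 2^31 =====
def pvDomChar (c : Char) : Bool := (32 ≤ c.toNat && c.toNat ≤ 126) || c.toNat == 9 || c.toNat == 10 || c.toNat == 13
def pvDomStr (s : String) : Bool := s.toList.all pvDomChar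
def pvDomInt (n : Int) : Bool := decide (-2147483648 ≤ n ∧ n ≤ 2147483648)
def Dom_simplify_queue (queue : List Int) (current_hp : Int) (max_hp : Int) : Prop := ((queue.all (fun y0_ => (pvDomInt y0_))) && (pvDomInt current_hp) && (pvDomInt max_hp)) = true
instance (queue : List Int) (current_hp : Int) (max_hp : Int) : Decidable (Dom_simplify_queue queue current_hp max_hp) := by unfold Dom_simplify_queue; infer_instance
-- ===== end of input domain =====

-- B replaces A's accumulate-list + recursive slice-splitting + enumerate pass by a single loop
-- tracking the running hp and the death count, plus a direct loop over the basis for the leftover.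

-- ===== PORT A =====
def FOOD_BASIS : List Int := [12, 8, 4]

def pySign (num : Int) : Int := (if num > 0 then (1 : Int) else 0) - (if num < 0 then (1 : Int) else 0)

def clampedAddAndRevive (x y max_hp : Int) : Int :=
  let x := if x = 0 then max_hp else x
  max (min (x + y) max_hp) 0

-- list(accumulate(queue, func=..., initial=current_hp))
def pyAccumulate (queue : List Int) (current_hp max_hp : Int) : List Int :=
  (queue.foldl (fun (st : List Int × Int) y =>
    let v := clampedAddAndRevive st.2 y max_hp
    (st.1 ++ [v], v)) ([current_hp], current_hp)).1

theorem splitAtZero_index_lt {q : List Int} {i : Nat}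
    (h : PySem.List.index? q 0 = some i) : i < q.length := by
  obtain ⟨pre, suf, hq, hlen, -⟩ := (PySem.List.index?_eq_some_iff q 0 i).1 h
  subst hq; simp [← hlen]

def splitAtZero (q : List Int) : List (List Int) :=
  match _h : PySem.List.index? q 0 with
  | some i => splitAtZero (q.take i) ++ splitAtZero (q.drop (i + 1))
  | none => [q]
termination_by q.length
decreasing_by
  · have := splitAtZero_index_lt _h; simp [List.length_take]; omega
  · have := splitAtZero_index_lt _h; simp; omega

-- math.floor(num/divisor) on ints equals floor division; exact on the stated domain
def greedyPartition (num : Int) (last : Nat) : List Int :=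
  if h : last < FOOD_BASIS.length then
    let divisor := FOOD_BASIS[last]
    let k := PySem.Int.floordiv num divisor
    k :: greedyPartition (num - k * divisor) (last + 1)
  else []
termination_by FOOD_BASIS.length - last

-- FOOD_BASIS[n] is exact as pyGetD here: n < 3 always
def expressInBasis (num : Int) : List Int :=
  ((PySem.List.enumerate (greedyPartition |num| 0) 0).filter (fun p => decide (0 < p.2))).map
    (fun p => p.2 * PySem.List.pyGetD FOOD_BASIS p.1 0 * pySign num)

-- the body of A's `for n, x in enumerate(split_list)` loop
def aStep (total current_hp max_hp : Int) (st : Int × List Int) (p : Int × List Int) : Int × List Int :=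
  if p.1 < total - 1 then (st.1 + 1, st.2)
  else if (decide (p.2 ≠ []) && (PySem.List.pyGet? p.2 (-1) == some max_hp)) || p.2.isEmpty then
    (st.1, ([] : List Int))
  else
    let base := if st.1 > 0 then max_hp else current_hp
    (st.1, expressInBasis (PySem.List.pyGetD p.2 (-1) 0 - base))

def simplify_queue (queue : List Int) (current_hp : Int) (max_hp : Int) : Int × List Int :=
  let accumed := pyAccumulate queue current_hp max_hp
  let split := splitAtZero accumed
  let total : Int := split.length
  (PySem.List.enumerate split 0).foldl (aStep total current_hp max_hp) ((0 : Int), ([] : List Int))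

-- ===== PORT B =====
def simplify_queue_alt (queue : List Int) (current_hp : Int) (max_hp : Int) : Int × List Int :=
  let st := queue.foldl (fun (s : Int × Int) y =>
      let hp := if s.2 = 0 then max_hp else s.2
      let hp := max (min (hp + y) max_hp) 0
      (if hp = 0 then s.1 + 1 else s.1, hp))
    ((if current_hp = 0 then (1 : Int) else 0), current_hp)
  let deaths := st.1
  let hp := st.2
  if hp = 0 ∨ hp = max_hp then (deaths, [])
  else
    let base := if deaths > 0 then max_hp else current_hp
    let num := hp - base
    let s : Int := if num > 0 then 1 else if num < 0 then -1 else 0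
    let res := FOOD_BASIS.foldl (fun (st : Int × List Int) d =>
        let k := PySem.Int.floordiv st.1 d
        let m := st.1 - k * d
        (m, if k > 0 then st.2 ++ [k * d * s] else st.2)) (|num|, ([] : List Int))
    (deaths, res.2)

-- ===== PRECONDITION & SPEC =====
def Spec_simplify_queue (queue : List Int) (current_hp : Int) (max_hp : Int) (out : Int × List Int) : Prop := out = simplify_queue_alt queue current_hp max_hp
instance (queue : List Int) (current_hp : Int) (max_hp : Int) (out : Int × List Int) : Decidable (Spec_simplify_queue queue current_hp max_hp out) := by unfold Spec_simplify_queue; infer_instance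

-- ===== CLAIM (what is proved, stated in full; the proofs are below) =====
def Claim_equal_simplify_queue : Prop := ∀ (queue : List Int) (current_hp : Int) (max_hp : Int), Dom_simplify_queue queue current_hp max_hp → Spec_simplify_queue queue current_hp max_hp (simplify_queue queue current_hp max_hp)

-- ===== LEMMAS AND PROOFS =====

-- accumulated hp values, without the initial element
def vals (queue : List Int) (c mx : Int) : List Int :=
  match queue with
  | [] => []
  | y :: q => let v := clampedAddAndRevive c y mx; v :: vals q v mx

theorem accAux (mx : Int) : ∀ (q : List Int) (acc : List Int) (c : Int),
    q.foldl (fun (st : List Int × Int) y =>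
      let v := clampedAddAndRevive st.2 y mx
      (st.1 ++ [v], v)) (acc, c)
    = (acc ++ vals q c mx, (vals q c mx).getLastD c) := by
  intro q
  induction q with
  | nil => intro acc c; simp [vals]
  | cons y q ih =>
    intro acc c
    simp only [List.foldl_cons, vals, ih, List.getLastD_cons, List.append_assoc,
      List.singleton_append]

theorem pyAccumulate_eq (queue : List Int) (c mx : Int) :
    pyAccumulate queue c mx = c :: vals queue c mx := by
  unfold pyAccumulate
  rw [accAux]
  simp

-- suffix of l after its last zero
def afterLastZero (l : List Int) : List Int :=
  (l.reverse.takeWhile (fun x => x != 0)).reverse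

theorem splitAtZero_decomp {l : List Int} {i : Nat}
    (h : PySem.List.index? l 0 = some i) :
    ∃ pre suf, l = pre ++ 0 :: suf ∧ l.take i = pre ∧ l.drop (i + 1) = suf ∧ (0 : Int) ∉ pre := by
  obtain ⟨pre, suf, hq, hlen, hmem⟩ := (PySem.List.index?_eq_some_iff l 0 i).1 h
  refine ⟨pre, suf, hq, ?_, ?_, hmem⟩
  · subst hq; rw [← hlen]; exact List.take_left
  · subst hq
    have : pre ++ 0 :: suf = (pre ++ [0]) ++ suf := by simp
    rw [this, ← hlen]
    have hl : (pre ++ [(0:Int)]).length = pre.length + 1 := by simp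
    rw [show pre.length + 1 = (pre ++ [(0:Int)]).length from hl.symm]
    exact List.drop_left

theorem length_splitAtZero (l : List Int) :
    (splitAtZero l).length = l.count 0 + 1 := by
  fun_induction splitAtZero l with
  | case1 l i h ih1 ih2 =>
    obtain ⟨pre, suf, hq, ht, hd, hmem⟩ := splitAtZero_decomp h
    have hc : List.count (0:Int) pre = 0 := List.count_eq_zero.2 hmem
    rw [ht] at ih1
    rw [hd] at ih2
    rw [List.length_append, ht, hd, ih1, ih2, hq]
    simp [List.count_append, hc]
    omega
  | case2 l h =>
    have : (0:Int) ∉ l := (PySem.List.index?_eq_none_iff l 0).1 h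
    simp [List.count_eq_zero.2 this]

theorem splitAtZero_ne_nil (l : List Int) : splitAtZero l ≠ [] := by
  fun_induction splitAtZero l with
  | case1 l i h ih1 ih2 => simp [ih2]
  | case2 l h => simp

theorem takeWhile_append_zero (p : Int → Bool) (hp : p 0 = false) :
    ∀ (a r : List Int), (a ++ 0 :: r).takeWhile p = a.takeWhile p := by
  intro a
  induction a with
  | nil => intro r; simp [hp]
  | cons x a ih =>
    intro r
    simp only [List.cons_append, List.takeWhile_cons]
    cases p x <;> simp [ih]

theorem afterLastZero_append (pre suf : List Int) :
    afterLastZero (pre ++ 0 :: suf) = afterLastZero suf := by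
  unfold afterLastZero
  have h1 : (pre ++ 0 :: suf).reverse = suf.reverse ++ 0 :: pre.reverse := by
    simp
  rw [h1, takeWhile_append_zero _ (by simp)]

theorem getLastD_splitAtZero (l : List Int) :
    (splitAtZero l).getLastD [] = afterLastZero l := by
  fun_induction splitAtZero l with
  | case1 l i h ih1 ih2 =>
    obtain ⟨pre, suf, hq, ht, hd, hmem⟩ := splitAtZero_decomp h
    rw [hd] at ih2
    rw [List.getLastD_eq_getLast?, List.getLast?_append_of_ne_nil _ (splitAtZero_ne_nil _),
      ← List.getLastD_eq_getLast?, hd, ih2, hq, afterLastZero_append]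
  | case2 l h =>
    have h0 : (0:Int) ∉ l := (PySem.List.index?_eq_none_iff l 0).1 h
    have : l.reverse.takeWhile (fun x => x != 0) = l.reverse := by
      rw [List.takeWhile_eq_self_iff]
      intro x hx
      simp only [bne_iff_ne, ne_eq]
      intro hx0; exact h0 (by simpa [hx0] using (List.mem_reverse.1 hx))
    simp [afterLastZero, this]

-- leftover computed by A's loop for the final sub-chain, at a given death count
def handleLast (c mx deaths : Int) (x : List Int) : List Int :=
  if (decide (x ≠ []) && (PySem.List.pyGet? x (-1) == some mx)) || x.isEmpty then []
  else expressInBasis (PySem.List.pyGetD x (-1) 0 - if deaths > 0 then mx else c)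

theorem getLastD_of_ne_nil {α : Type} {s : List α} (h : s ≠ []) (a b : α) :
    s.getLastD a = s.getLastD b := by
  rw [List.getLastD_eq_getLast?, List.getLastD_eq_getLast?]
  cases hq : s.getLast? with
  | none => exact absurd (List.getLast?_eq_none_iff.1 hq) h
  | some y => rfl

theorem foldl_aStep (c mx : Int) (total : Int) :
    ∀ (s : List (List Int)) (k : Nat) (d : Int) (lq : List Int), s ≠ [] →
      (k : Int) + s.length = total →
      (PySem.List.enumerate s k).foldl (aStep total c mx) (d, lq) =
        (d + (s.length : Int) - 1,
         handleLast c mx (d + (s.length : Int) - 1) (s.getLastD [])) := by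
  intro s
  induction s with
  | nil => intro k d lq h; exact absurd rfl h
  | cons x s ih =>
    intro k d lq _ htot
    by_cases hs : s = []
    · subst hs
      have hk : (k : Int) = total - 1 := by
        simp at htot; omega
      simp only [PySem.List.enumerate_cons, PySem.List.enumerate_nil, List.foldl_cons,
        List.foldl_nil, List.length_cons, List.length_nil]
      unfold aStep
      rw [hk]
      simp only [lt_irrefl, if_false, lt_self_iff_false]
      unfold handleLast
      norm_num
      split_ifs <;> rfl
    · have hlt : (k : Int) < total - 1 := by
        have h1 : 1 ≤ s.length := List.length_pos_iff.2 hs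
        simp at htot; omega
      have step1 : aStep total c mx (d, lq) ((k : Int), x) = (d + 1, lq) := by
        unfold aStep; rw [if_pos hlt]
      have hcast : ((k : Int) + 1) = ((k + 1 : Nat) : Int) := by push_cast; ring
      rw [PySem.List.enumerate_cons, List.foldl_cons, step1, hcast,
        ih (k + 1) (d + 1) lq hs (by simp only [List.length_cons] at htot; push_cast at htot ⊢; omega)]
      have harith : d + 1 + (s.length : Int) - 1 = d + ((x :: s).length : Int) - 1 := by
        simp only [List.length_cons]; push_cast; ring
      rw [harith, List.getLastD_cons, getLastD_of_ne_nil hs x []]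

theorem afterLastZero_nil_iff {l : List Int} (h : l ≠ []) :
    afterLastZero l = [] ↔ l.getLastD 0 = 0 := by
  cases hr : l.reverse with
  | nil => exact absurd (List.reverse_eq_nil_iff.1 hr) h
  | cons hd tl =>
    have hlast : l.getLastD 0 = hd := by
      rw [List.getLastD_eq_getLast?, ← List.head?_reverse, hr]; rfl
    unfold afterLastZero
    rw [hr, List.takeWhile_cons, hlast]
    by_cases h0 : hd = 0 <;> simp [h0]

theorem getLast?_afterLastZero {l : List Int} (h : afterLastZero l ≠ []) :
    (afterLastZero l).getLast? = l.getLast? := by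
  cases hr : l.reverse with
  | nil =>
    exfalso; apply h; unfold afterLastZero; rw [hr]; rfl
  | cons hd tl =>
    have h0 : hd ≠ 0 := by
      intro h0; apply h; unfold afterLastZero; rw [hr, List.takeWhile_cons, h0]; simp
    unfold afterLastZero
    rw [hr, List.takeWhile_cons, if_pos (by simp [h0]), List.getLast?_reverse,
      ← List.head?_reverse, hr]
    rfl

theorem simplify_queue_canon (q : List Int) (c mx : Int) :
    simplify_queue q c mx =
      (let l := c :: vals q c mx
       let last := l.getLastD 0
       (((l.count 0 : Int)),
        if last = 0 ∨ last = mx then []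
        else expressInBasis (last - if ((l.count 0 : Int)) > 0 then mx else c))) := by
  have key : simplify_queue q c mx =
      List.foldl (aStep ((splitAtZero (pyAccumulate q c mx)).length : Int) c mx)
        ((0 : Int), ([] : List Int))
        (PySem.List.enumerate (splitAtZero (pyAccumulate q c mx)) (((0:Nat) : Int))) := rfl
  rw [key, pyAccumulate_eq]
  have hne : (c :: vals q c mx : List Int) ≠ [] := List.cons_ne_nil _ _
  rw [foldl_aStep c mx _ (splitAtZero (c :: vals q c mx)) 0 0 []
    (splitAtZero_ne_nil _) (by simp)]
  rw [getLastD_splitAtZero, length_splitAtZero]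
  simp only []
  set l := c :: vals q c mx with hl
  set last := l.getLastD 0 with hlast
  set cnt : Int := (l.count 0 : Int) with hcnt
  have hfst : (0 : Int) + ((l.count 0 + 1 : Nat) : Int) - 1 = cnt := by push_cast [hcnt]; ring
  rw [hfst]
  by_cases h0 : last = 0
  · have hx : afterLastZero l = [] := (afterLastZero_nil_iff hne).2 h0
    unfold handleLast
    rw [hx]
    simp [h0]
  · have hx : afterLastZero l ≠ [] := fun hc => h0 ((afterLastZero_nil_iff hne).1 hc)
    have hg : (afterLastZero l).getLast? = some last := by
      rw [getLast?_afterLastZero hx, List.getLast?_eq_some_getLast hne, hlast,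
        List.getLastD_eq_getLast?, List.getLast?_eq_some_getLast hne]
      rfl
    unfold handleLast
    rw [PySem.List.pyGet?_neg_one, hg, PySem.List.pyGetD_neg_one _ 0 hx,
      show (afterLastZero l).getLast hx = last from by
        have := List.getLast?_eq_some_getLast hx
        rw [hg] at this; exact (Option.some_inj).1 this.symm]
    simp [hx, h0]

theorem bfold (mx : Int) : ∀ (q : List Int) (z c : Int),
    q.foldl (fun (s : Int × Int) y =>
      let hp := if s.2 = 0 then mx else s.2
      let hp := max (min (hp + y) mx) 0
      (if hp = 0 then s.1 + 1 else s.1, hp)) (z, c)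
    = (z + ((vals q c mx).count 0 : Int), (vals q c mx).getLastD c) := by
  intro q
  induction q with
  | nil => intro z c; simp [vals]
  | cons y q ih =>
    intro z c
    rw [List.foldl_cons]
    show List.foldl _ ((if clampedAddAndRevive c y mx = 0 then z + 1 else z),
      clampedAddAndRevive c y mx) q = _
    rw [ih]
    simp only [vals, List.getLastD_cons, List.count_cons, Prod.mk.injEq]
    refine ⟨?_, trivial⟩
    by_cases hv : clampedAddAndRevive c y mx = 0 <;> simp [hv] <;> push_cast <;> ring

theorem basisFold_eq (num : Int) :
    (FOOD_BASIS.foldl (fun (st : Int × List Int) d =>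
        let k := PySem.Int.floordiv st.1 d
        let m := st.1 - k * d
        (m, if k > 0 then st.2 ++ [k * d * (if num > 0 then (1:Int) else if num < 0 then -1 else 0)] else st.2))
      (|num|, ([] : List Int))).2 = expressInBasis num := by
  have hs : (if num > 0 then (1:Int) else if num < 0 then -1 else 0) = pySign num := by
    unfold pySign; split_ifs <;> omega
  rw [hs]
  unfold expressInBasis
  rw [show greedyPartition |num| 0 =
      [PySem.Int.floordiv |num| 12,
       PySem.Int.floordiv (|num| - PySem.Int.floordiv |num| 12 * 12) 8,
       PySem.Int.floordiv
         ((|num| - PySem.Int.floordiv |num| 12 * 12)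
           - PySem.Int.floordiv (|num| - PySem.Int.floordiv |num| 12 * 12) 8 * 8) 4] from by
    simp [greedyPartition.eq_def, FOOD_BASIS]]
  simp only [FOOD_BASIS, List.foldl_cons, List.foldl_nil,
    PySem.List.enumerate_cons, PySem.List.enumerate_nil, List.filter_cons, List.filter_nil,
    decide_eq_true_eq]
  split_ifs <;> simp [PySem.List.pyGetD, PySem.List.pyGet?, PySem.List.pyIdx?]

theorem simplify_queue_alt_canon (q : List Int) (c mx : Int) :
    simplify_queue_alt q c mx =
      (let l := c :: vals q c mx
       let last := l.getLastD 0
       (((l.count 0 : Int)),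
        if last = 0 ∨ last = mx then []
        else expressInBasis (last - if ((l.count 0 : Int)) > 0 then mx else c))) := by
  unfold simplify_queue_alt
  rw [bfold]
  have hcnt : ((List.count (0:Int) (c :: vals q c mx) : Nat) : Int)
      = (if c = 0 then (1:Int) else 0) + ((vals q c mx).count 0 : Int) := by
    rw [List.count_cons]
    by_cases hc : c = 0 <;> simp [hc] <;> push_cast <;> omega
  simp only [List.getLastD_cons, ← hcnt]
  by_cases h1 : (vals q c mx).getLastD c = 0 ∨ (vals q c mx).getLastD c = mx
  · simp only [if_pos h1]
  · rw [if_neg h1, if_neg h1]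
    simp only [Prod.mk.injEq]
    exact ⟨trivial, basisFold_eq _⟩

-- ===== VERDICT (by name: the statement is the Claim_ definition above) =====
theorem simplify_queue_spec : Claim_equal_simplify_queue := by
  intro q c mx _
  unfold Spec_simplify_queue
  rw [simplify_queue_canon, simplify_queue_alt_canon]
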